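-- pv_equiv track=rewrite | github.com/pypi-data/pypi-mirror-344 | packages/quantum-cli-sdk/quantum_cli_sdk-0.3.7.tar.gz/quantum_cli_sdk-0.3.7/src/quantum_cli_sdk/commands/package.py | create_manifest
-- ===== SOURCE A (Python) =====
-- def create_manifest(config, files):
--     """
--     Create package manifest.
--
--     Args:
--         config (dict): Package configuration (parsed from source manifest)
--         files (list): List of included files
--
--     Returns:
--         dict: Manifest data
--     """
--     import copy
--     manifest = copy.deepcopy(config)
--     # Remove unwanted fields
--     for field in [
--         "entrypoint", "requirements", "metadata", "include", "exclude",
--         "files", "quantum_sdk_version"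
--     ]:
--         manifest.pop(field, None)
--     return manifest
-- ===== SOURCE B (Python) =====
-- EXCLUDED = {"entrypoint", "requirements", "metadata", "include", "exclude",
--             "files", "quantum_sdk_version"}
--
--
-- def create_manifest(config, files):
--     """
--     Create package manifest.
--
--     Args:
--         config (dict): Package configuration (parsed from source manifest)
--         files (list): List of included files
--
--     Returns:
--         dict: Manifest data
--     """
--     import copy
--     manifest = copy.deepcopy(config)
--     return {k: v for k, v in manifest.items() if k not in EXCLUDED}
-- ===== Notes on version B (the rewrite author's own statement) =====
-- stated objective: simpler
-- what changed: Instead of mutating a deep copy by popping each of the 7 blacklisted fields in turn, B deep-copies once and builds the result in a single pass over config's own items, keeping keys not in a fixed excluded set.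
import Mathlib
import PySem

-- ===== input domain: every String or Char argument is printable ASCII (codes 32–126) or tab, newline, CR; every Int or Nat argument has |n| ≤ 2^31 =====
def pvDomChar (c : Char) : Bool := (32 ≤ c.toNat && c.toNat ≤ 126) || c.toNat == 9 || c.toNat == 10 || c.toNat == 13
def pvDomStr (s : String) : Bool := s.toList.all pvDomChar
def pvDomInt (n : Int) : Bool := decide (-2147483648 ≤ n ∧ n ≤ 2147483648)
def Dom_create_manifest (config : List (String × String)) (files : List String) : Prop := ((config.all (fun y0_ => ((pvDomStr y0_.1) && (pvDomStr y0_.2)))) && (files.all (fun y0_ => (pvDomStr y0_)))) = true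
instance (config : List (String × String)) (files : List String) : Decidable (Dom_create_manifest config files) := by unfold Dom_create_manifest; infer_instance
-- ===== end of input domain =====

-- B drops the per-field pop loop: one filtering pass over config's items keeping keys outside a fixed excluded set (simpler; same result).
-- Equivalence is about the RETURN value; deepcopy is the identity on these immutable string values.

-- ===== PORT A =====
-- manifest = deepcopy(config); for field in [...]: manifest.pop(field, None)
-- dict keys are unique, so pop(field, None) removes exactly the entry keyed field (filter is exact here).
def create_manifest (config : List (String × String)) (files : List String) : List (String × String) :=
  ["entrypoint", "requirements", "metadata", "include", "exclude",
   "files", "quantum_sdk_version"].foldl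
    (fun (manifest : List (String × String)) (field : String) =>
      manifest.filter (fun p => p.1 != field))
    config

-- ===== PORT B =====
def excluded_alt : List String :=
  ["entrypoint", "requirements", "metadata", "include", "exclude",
   "files", "quantum_sdk_version"]

def create_manifest_alt (config : List (String × String)) (files : List String) : List (String × String) :=
  config.filter (fun p => !(excluded_alt.contains p.1))

-- ===== PRECONDITION & SPEC =====
def Spec_create_manifest (config : List (String × String)) (files : List String) (out : List (String × String)) : Prop := out = create_manifest_alt config files
instance (config : List (String × String)) (files : List String) (out : List (String × String)) : Decidable (Spec_create_manifest config files out) := by unfold Spec_create_manifest; infer_instance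

-- ===== CLAIM (what is proved, stated in full; the proofs are below) =====
def Claim_equal_create_manifest : Prop := ∀ (config : List (String × String)) (files : List String), Dom_create_manifest config files → Spec_create_manifest config files (create_manifest config files)

-- ===== LEMMAS AND PROOFS =====

-- ===== VERDICT (by name: the statement is the Claim_ definition above) =====
theorem create_manifest_spec : Claim_equal_create_manifest := by
  intro config files _
  show _ = _
  simp only [create_manifest, create_manifest_alt, excluded_alt,
    List.foldl_cons, List.foldl_nil, List.filter_filter]
  apply List.filter_congr
  intro p _
  rw [Bool.eq_iff_iff]
  simp only [Bool.and_eq_true, bne_iff_ne, ne_eq, Bool.not_eq_eq_eq_not, Bool.not_true,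
    List.contains_eq_mem, decide_eq_false_iff_not, List.mem_cons, List.not_mem_nil, not_or]
  tauto
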